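-- pv_equiv track=rewrite | github.com/moshlwx/leetcode | CODE/1664. 生成平衡数组的方案数.py | waysToMakeFair_baoli
-- ===== SOURCE A (Python) =====
-- def waysToMakeFair_baoli(nums):
--     # 暴力方案，遍历数组，计算剩余元素是否为平衡数组
--     def isFair(nums):
--         sum_odd = 0
--         sum_eve = 0
--         for i in range(0, len(nums)):
--             if i % 2 == 0:
--                 sum_eve += nums[i]
--             else:
--                 sum_odd += nums[i]
--         return sum_eve == sum_odd
--
--     cnt = 0
--     for i in range(0, len(nums)):
--         if isFair(nums[:i]+nums[i+1:]):
--             cnt += 1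
--
--     return cnt
-- ===== SOURCE B (Python) =====
-- def waysToMakeFair_baoli(nums):
--     # one pass with running even/odd prefix and suffix sums; O(n) instead of O(n^2)
--     te = 0
--     to = 0
--     for i, x in enumerate(nums):
--         if i % 2 == 0:
--             te += x
--         else:
--             to += x
--     pe = 0
--     po = 0
--     cnt = 0
--     for i, x in enumerate(nums):
--         if i % 2 == 0:
--             te -= x
--         else:
--             to -= x
--         if pe + to == po + te:
--             cnt += 1
--         if i % 2 == 0:
--             pe += x
--         else:
--             po += x
--     return cnt
-- ===== Notes on version B (the rewrite author's own statement) =====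
-- stated objective: faster
-- what changed: Replaces the brute force that rebuilds and re-scans the n-1 element list for every removed index with a single pass maintaining even/odd prefix and suffix sums and an O(1) balance check per index.
import Mathlib
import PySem

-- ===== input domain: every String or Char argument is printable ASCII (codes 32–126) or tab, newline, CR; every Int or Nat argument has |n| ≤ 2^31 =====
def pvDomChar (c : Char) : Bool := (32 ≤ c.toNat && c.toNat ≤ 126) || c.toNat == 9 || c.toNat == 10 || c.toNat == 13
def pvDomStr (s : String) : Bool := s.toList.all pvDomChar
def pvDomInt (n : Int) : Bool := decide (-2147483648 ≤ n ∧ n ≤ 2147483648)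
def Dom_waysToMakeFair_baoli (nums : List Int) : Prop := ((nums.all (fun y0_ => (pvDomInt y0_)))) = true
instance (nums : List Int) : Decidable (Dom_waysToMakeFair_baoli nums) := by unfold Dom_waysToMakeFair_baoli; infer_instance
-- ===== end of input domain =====

-- B replaces A's rebuild-and-rescan per index (O(n^2)) by one pass with even/odd prefix and
-- suffix sums and an O(1) check per index (objective: faster).

-- ===== PORT A =====
-- helper 'isFair': Python's 'for i in range(0, len(nums)): … nums[i] …' is ported as a fold
-- over the (element, index) pairs — the same iterations, same state, in the same order.
def pvIsFair (xs : List Int) : Bool :=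
  let s := xs.zipIdx.foldl
    (fun (s : Int × Int) (p : Int × Nat) =>
      if p.2 % 2 = 0 then (s.1 + p.1, s.2) else (s.1, s.2 + p.1)) (0, 0)
  decide (s.1 = s.2)

def waysToMakeFair_baoli (nums : List Int) : Int :=
  (List.range nums.length).foldl
    (fun (cnt : Int) (i : Nat) =>
      if pvIsFair (PySem.List.slice nums none (some (i : Int)) ++
                   PySem.List.slice nums (some ((i : Int) + 1)) none)
      then cnt + 1 else cnt) 0

-- ===== PORT B =====
def waysToMakeFair_baoli_alt (nums : List Int) : Int :=
  -- first loop: totals of even-/odd-indexed elements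
  let t := nums.zipIdx.foldl
    (fun (s : Int × Int) (p : Int × Nat) =>
      if p.2 % 2 = 0 then (s.1 + p.1, s.2) else (s.1, s.2 + p.1)) (0, 0)
  -- second loop, state (te, tod, pe, po, cnt)
  let r := nums.zipIdx.foldl
    (fun (s : Int × Int × Int × Int × Int) (p : Int × Nat) =>
      let te := if p.2 % 2 = 0 then s.1 - p.1 else s.1
      let tod := if p.2 % 2 = 0 then s.2.1 else s.2.1 - p.1
      let cnt := if s.2.2.1 + tod = s.2.2.2.1 + te then s.2.2.2.2 + 1 else s.2.2.2.2
      let pe := if p.2 % 2 = 0 then s.2.2.1 + p.1 else s.2.2.1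
      let po := if p.2 % 2 = 0 then s.2.2.2.1 else s.2.2.2.1 + p.1
      (te, tod, pe, po, cnt))
    (t.1, t.2, 0, 0, 0)
  r.2.2.2.2

-- ===== PRECONDITION & SPEC =====
def Spec_waysToMakeFair_baoli (nums : List Int) (out : Int) : Prop := out = waysToMakeFair_baoli_alt nums
instance (nums : List Int) (out : Int) : Decidable (Spec_waysToMakeFair_baoli nums out) := by unfold Spec_waysToMakeFair_baoli; infer_instance

-- ===== CLAIM (what is proved, stated in full; the proofs are below) =====
def Claim_equal_waysToMakeFair_baoli : Prop := ∀ (nums : List Int), Dom_waysToMakeFair_baoli nums → Spec_waysToMakeFair_baoli nums (waysToMakeFair_baoli nums)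

-- ===== LEMMAS AND PROOFS =====

-- (evenIdxSum, oddIdxSum) of a list in its own indexing
def pvPsum : List Int → Int × Int
  | [] => (0, 0)
  | x :: r => (x + (pvPsum r).2, (pvPsum r).1)

-- alternating (signed) sum
def pvAlts (xs : List Int) : Int := (pvPsum xs).1 - (pvPsum xs).2

-- reference count, A-shaped recursion
def pvG (t : Int) : List Int → Int
  | [] => 0
  | x :: r => (if pvAlts r = t then 1 else 0) + pvG (x - t) r

-- reference count, B-shaped recursion
def pvCgo (sgn d e : Int) : List Int → Int
  | [] => 0
  | x :: r => (if d = e - sgn * x then 1 else 0) + pvCgo (-sgn) (d + sgn * x) (e - sgn * x) r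

lemma pv_fold_psum (xs : List Int) : ∀ (k : Nat) (s : Int × Int),
    (xs.zipIdx k).foldl
      (fun (s : Int × Int) (p : Int × Nat) =>
        if p.2 % 2 = 0 then (s.1 + p.1, s.2) else (s.1, s.2 + p.1)) s
    = if k % 2 = 0 then (s.1 + (pvPsum xs).1, s.2 + (pvPsum xs).2)
      else (s.1 + (pvPsum xs).2, s.2 + (pvPsum xs).1) := by
  induction xs with
  | nil => intro k s; simp [pvPsum]
  | cons x r ih =>
      intro k s
      by_cases hk : k % 2 = 0
      · have hk1 : ¬ (k + 1) % 2 = 0 := by omega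
        simp only [List.zipIdx_cons, List.foldl_cons, hk, if_true, ih, hk1, if_false, pvPsum]
        exact Prod.ext (by ring) (by ring)
      · have hk1 : (k + 1) % 2 = 0 := by omega
        simp only [List.zipIdx_cons, List.foldl_cons, hk, if_false, ih, hk1, if_true, pvPsum]
        exact Prod.ext (by ring) (by ring)

lemma pv_isFair_eq (xs : List Int) :
    pvIsFair xs = decide ((pvPsum xs).1 = (pvPsum xs).2) := by
  unfold pvIsFair
  rw [pv_fold_psum xs 0 (0, 0)]
  simp

def pvDiff (xs : List Int) (i : Nat) : Int :=
  (pvPsum (xs.take i ++ xs.drop (i + 1))).1 - (pvPsum (xs.take i ++ xs.drop (i + 1))).2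

lemma pvDiff_zero (x : Int) (r : List Int) : pvDiff (x :: r) 0 = pvAlts r := by
  simp [pvDiff, pvAlts]

lemma pvDiff_succ (x : Int) (r : List Int) (i : Nat) :
    pvDiff (x :: r) (i + 1) = x - pvDiff r i := by
  simp only [pvDiff, List.take_succ_cons, List.drop_succ_cons, List.cons_append, pvPsum]
  ring

lemma pv_foldA (xs : List Int) : ∀ (t c : Int),
    (List.range xs.length).foldl
      (fun cnt i => if pvDiff xs i = t then cnt + 1 else cnt) c
    = c + pvG t xs := by
  induction xs with
  | nil => intro t c; simp [pvG]
  | cons x r ih =>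
      intro t c
      have hr : List.range (x :: r).length = 0 :: (List.range r.length).map Nat.succ := by
        simp [List.range_succ_eq_map]
      rw [hr]
      simp only [List.foldl_cons, List.foldl_map]
      have hfun : (fun (cnt : Int) (i : Nat) =>
          if pvDiff (x :: r) i.succ = t then cnt + 1 else cnt)
          = (fun (cnt : Int) (i : Nat) => if pvDiff r i = x - t then cnt + 1 else cnt) := by
        funext cnt i
        rw [Nat.succ_eq_add_one, pvDiff_succ]
        exact if_congr ⟨fun h => by linarith, fun h => by linarith⟩ rfl rfl
      rw [pvDiff_zero, hfun, ih (x - t)]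
      simp only [pvG]
      by_cases h : pvAlts r = t <;> simp [h] <;> ring_nf

lemma pvAlts_cons (x : Int) (r : List Int) : pvAlts (x :: r) = x - pvAlts r := by
  simp [pvAlts, pvPsum]; ring

lemma pv_cgo_G : ∀ (xs : List Int) (sgn d : Int), sgn = 1 ∨ sgn = -1 →
    pvCgo sgn d (sgn * pvAlts xs) xs = pvG (-(sgn * d)) xs := by
  intro xs
  induction xs with
  | nil => intro sgn d _; simp [pvCgo, pvG]
  | cons x r ih =>
      intro sgn d hs
      have he : sgn * pvAlts (x :: r) - sgn * x = (-sgn) * pvAlts r := by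
        rw [pvAlts_cons]; ring
      simp only [pvCgo, pvG]
      rw [he, ih (-sgn) (d + sgn * x) (by rcases hs with rfl | rfl <;> simp)]
      rcases hs with rfl | rfl
      · have h1 : (-((-1 : Int) * (d + 1 * x))) = x - -(1 * d) := by ring
        rw [h1]
        congr 1
        exact if_congr ⟨fun h => by linarith, fun h => by linarith⟩ rfl rfl
      · have h1 : (-((- (-1) : Int) * (d + -1 * x))) = x - -(-1 * d) := by ring
        rw [h1]
        congr 1
        exact if_congr ⟨fun h => by linarith, fun h => by linarith⟩ rfl rfl

lemma pv_A_eq_G (nums : List Int) : waysToMakeFair_baoli nums = pvG 0 nums := by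
  unfold waysToMakeFair_baoli
  have hfun : (fun (cnt : Int) (i : Nat) =>
      if pvIsFair (PySem.List.slice nums none (some (i : Int)) ++
                   PySem.List.slice nums (some ((i : Int) + 1)) none)
      then cnt + 1 else cnt)
      = (fun (cnt : Int) (i : Nat) => if pvDiff nums i = 0 then cnt + 1 else cnt) := by
    funext cnt i
    have h1 : PySem.List.slice nums none (some (i : Int)) = nums.take i :=
      PySem.List.slice_to_natCast nums i
    have h2 : PySem.List.slice nums (some ((i : Int) + 1)) none = nums.drop (i + 1) := by
      have : ((i : Int) + 1) = ((i + 1 : Nat) : Int) := by push_cast; ring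
      rw [this]
      exact PySem.List.slice_from_natCast nums (i + 1)
    rw [h1, h2, pv_isFair_eq]
    refine if_congr ?_ rfl rfl
    unfold pvDiff
    constructor
    · intro h; have := of_decide_eq_true h; omega
    · intro h; exact decide_eq_true (by omega)
  rw [hfun, pv_foldA nums 0 0]
  ring

lemma pv_foldB (xs : List Int) : ∀ (k : Nat) (te tod pe po cnt : Int),
    ((xs.zipIdx k).foldl
      (fun (s : Int × Int × Int × Int × Int) (p : Int × Nat) =>
        let te := if p.2 % 2 = 0 then s.1 - p.1 else s.1
        let tod := if p.2 % 2 = 0 then s.2.1 else s.2.1 - p.1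
        let cnt := if s.2.2.1 + tod = s.2.2.2.1 + te then s.2.2.2.2 + 1 else s.2.2.2.2
        let pe := if p.2 % 2 = 0 then s.2.2.1 + p.1 else s.2.2.1
        let po := if p.2 % 2 = 0 then s.2.2.2.1 else s.2.2.2.1 + p.1
        (te, tod, pe, po, cnt))
      (te, tod, pe, po, cnt)).2.2.2.2
    = cnt + pvCgo (if k % 2 = 0 then 1 else -1) (pe - po) (te - tod) xs := by
  induction xs with
  | nil => intro k te tod pe po cnt; simp [pvCgo]
  | cons x r ih =>
      intro k te tod pe po cnt
      by_cases hk : k % 2 = 0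
      · have hk1 : ¬ (k + 1) % 2 = 0 := by omega
        simp only [List.zipIdx_cons, List.foldl_cons, hk, if_true]
        rw [ih (k + 1)]
        simp only [hk1, if_false, pvCgo]
        have harg1 : pe + x - po = (pe - po) + 1 * x := by ring
        have harg2 : te - x - tod = (te - tod) - 1 * x := by ring
        by_cases hc : pe + tod = po + (te - x)
        · have hc' : pe - po = (te - tod) - 1 * x := by linarith
          simp only [hc, if_true, hc', harg1, harg2]
          ring
        · have hc' : ¬ (pe - po = (te - tod) - 1 * x) := by intro h; exact hc (by linarith)
          simp only [hc, if_false, hc', harg1, harg2]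
          ring
      · have hk1 : (k + 1) % 2 = 0 := by omega
        simp only [List.zipIdx_cons, List.foldl_cons, hk, if_false]
        rw [ih (k + 1)]
        simp only [hk1, if_true, pvCgo]
        have harg1 : pe - (po + x) = (pe - po) + (-1) * x := by ring
        have harg2 : te - (tod - x) = (te - tod) - (-1) * x := by ring
        have hneg : (1 : Int) = -(-1 : Int) := by norm_num
        by_cases hc : pe + (tod - x) = po + te
        · have hc' : pe - po = (te - tod) - (-1) * x := by linarith
          simp only [hc, if_true, hc', harg1, harg2]
          rw [hneg]
          ring
        · have hc' : ¬ (pe - po = (te - tod) - (-1) * x) := by intro h; exact hc (by linarith)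
          simp only [hc, if_false, hc', harg1, harg2]
          rw [hneg]
          ring

lemma pv_B_eq_G (nums : List Int) : waysToMakeFair_baoli_alt nums = pvG 0 nums := by
  unfold waysToMakeFair_baoli_alt
  rw [pv_fold_psum nums 0 (0, 0)]
  simp only [Nat.zero_mod, if_true, zero_add]
  rw [pv_foldB nums 0 ((pvPsum nums).1) ((pvPsum nums).2) 0 0 0]
  simp only [Nat.zero_mod, if_true, zero_add, sub_zero]
  have h1 : (pvPsum nums).1 - (pvPsum nums).2 = 1 * pvAlts nums := by
    unfold pvAlts; ring
  rw [h1, pv_cgo_G nums 1 0 (Or.inl rfl)]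
  norm_num

-- ===== VERDICT (by name: the statement is the Claim_ definition above) =====
theorem waysToMakeFair_baoli_spec : Claim_equal_waysToMakeFair_baoli := by
  intro nums _
  unfold Spec_waysToMakeFair_baoli
  rw [pv_A_eq_G, pv_B_eq_G]
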